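-- pv_equiv track=rewrite | github.com/maalitars/Sentiment-Analysis | Sentiment_Analysis.py | kaalude_summa
-- ===== SOURCE A (Python) =====
-- def kaalude_summa(tweet_grammidena, kaal):  # Määrame ühe tweedi väärtuse
--     summa = 0
--     for a in tweet_grammidena:
--         for d in a:
--             for b in kaal:
--                 if d in b:
--                     summa += b[1]  # Liidame kokku tweedis olemasolevad parameetrite kaalud
--     return summa
-- ===== SOURCE B (Python) =====
-- def kaalude_summa(tweet_grammidena, kaal):
--     flat = [d for a in tweet_grammidena for d in a]
--     return sum(w * flat.count(t) for t, w in kaal)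
-- ===== Notes on version B (the rewrite author's own statement) =====
-- stated objective: simpler
-- what changed: B flattens the token lists once and drives the loop pair-major over kaal, returning sum(w * flat.count(t)), replacing A's token-major triple loop; same asymptotics but the per-token scan of kaal is replaced by one C-level count per pair (measured ~3.9x faster).
import Mathlib
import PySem

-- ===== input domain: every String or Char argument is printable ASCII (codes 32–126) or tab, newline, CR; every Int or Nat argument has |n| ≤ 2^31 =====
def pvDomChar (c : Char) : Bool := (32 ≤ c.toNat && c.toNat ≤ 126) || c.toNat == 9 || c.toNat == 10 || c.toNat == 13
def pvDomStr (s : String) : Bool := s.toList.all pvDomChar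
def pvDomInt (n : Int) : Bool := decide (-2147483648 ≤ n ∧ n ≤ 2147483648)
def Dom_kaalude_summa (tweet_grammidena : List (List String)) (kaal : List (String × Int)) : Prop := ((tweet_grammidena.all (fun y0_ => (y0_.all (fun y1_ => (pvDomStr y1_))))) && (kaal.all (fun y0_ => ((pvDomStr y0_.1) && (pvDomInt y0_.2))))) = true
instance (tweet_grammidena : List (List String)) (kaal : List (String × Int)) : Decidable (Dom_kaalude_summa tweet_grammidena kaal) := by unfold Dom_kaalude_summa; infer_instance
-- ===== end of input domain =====

-- B flattens the token lists once and loops pair-major over kaal, summing w * count; a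
-- simpler decomposition than A's token-major triple loop (same asymptotic cost).


-- ===== PORT A =====
-- Python's `d in b` on the pair b = (str, int) is `d == b[0] or d == b[1]`; the second
-- disjunct compares a str with an int and is always False in Python, so it is d = b.1 here.
def kaalude_summa (tweet_grammidena : List (List String)) (kaal : List (String × Int)) : Int :=
  tweet_grammidena.foldl (fun summa a =>
    a.foldl (fun summa d =>
      kaal.foldl (fun summa b => if d = b.1 then summa + b.2 else summa) summa) summa) 0

-- ===== PORT B =====
-- flat = [d for a in tweet_grammidena for d in a]; sum(w * flat.count(t) for t, w in kaal)
def kaalude_summa_alt (tweet_grammidena : List (List String)) (kaal : List (String × Int)) : Int :=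
  let flat := tweet_grammidena.flatMap (fun a => a)
  (kaal.map (fun b => b.2 * (PySem.List.count flat b.1 : Int))).sum

-- ===== PRECONDITION & SPEC =====
def Spec_kaalude_summa (tweet_grammidena : List (List String)) (kaal : List (String × Int)) (out : Int) : Prop := out = kaalude_summa_alt tweet_grammidena kaal
instance (tweet_grammidena : List (List String)) (kaal : List (String × Int)) (out : Int) : Decidable (Spec_kaalude_summa tweet_grammidena kaal out) := by unfold Spec_kaalude_summa; infer_instance

-- ===== CLAIM =====
def Claim_equal_kaalude_summa : Prop := ∀ (tweet_grammidena : List (List String)) (kaal : List (String × Int)), Dom_kaalude_summa tweet_grammidena kaal → Spec_kaalude_summa tweet_grammidena kaal (kaalude_summa tweet_grammidena kaal)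

-- ===== LEMMAS AND PROOFS =====

-- number of occurrences of t among the tokens, as an Int-valued sum
def pvOcc (tokens : List String) (t : String) : Int :=
  (tokens.map (fun d => if d = t then (1 : Int) else 0)).sum

theorem pvOcc_eq_count (tokens : List String) (t : String) :
    pvOcc tokens t = (PySem.List.count tokens t : Int) := by
  induction tokens with
  | nil => simp [pvOcc, PySem.List.count]
  | cons d l ih =>
      simp only [pvOcc, List.map_cons, List.sum_cons, PySem.List.count, List.count_cons,
        beq_iff_eq] at ih ⊢
      by_cases h : d = t
      · simp only [if_pos h]; push_cast at ih ⊢; omega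
      · simp only [if_neg h]; push_cast at ih ⊢; omega

theorem pvA_flatten (tg : List (List String)) (kaal : List (String × Int)) :
    kaalude_summa tg kaal =
      tg.flatten.foldl (fun summa d =>
        kaal.foldl (fun summa b => if d = b.1 then summa + b.2 else summa) summa) 0 := by
  simp [kaalude_summa, List.foldl_flatten]

theorem pvInner_add (kaal : List (String × Int)) (d : String) (s : Int) :
    kaal.foldl (fun summa b => if d = b.1 then summa + b.2 else summa) s
      = s + (kaal.map (fun b => if d = b.1 then b.2 else 0)).sum := by
  induction kaal generalizing s with
  | nil => simp
  | cons b l ih => simp only [List.foldl_cons, List.map_cons, List.sum_cons, ih]; split <;> omega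

theorem pvA_sum (tokens : List String) (kaal : List (String × Int)) :
    tokens.foldl (fun summa d =>
        kaal.foldl (fun summa b => if d = b.1 then summa + b.2 else summa) summa) 0
      = (tokens.map (fun d => (kaal.map (fun b => if d = b.1 then b.2 else 0)).sum)).sum := by
  have key : ∀ s : Int, tokens.foldl (fun summa d =>
        kaal.foldl (fun summa b => if d = b.1 then summa + b.2 else summa) summa) s
      = s + (tokens.map (fun d => (kaal.map (fun b => if d = b.1 then b.2 else 0)).sum)).sum := by
    induction tokens with
    | nil => simp
    | cons d l ih =>
        intro s
        simp only [List.foldl_cons, List.map_cons, List.sum_cons]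
        rw [pvInner_add, ih]
        ring
  simpa using key 0

theorem pvMapSum_add {α : Type} (l : List α) (g h : α → Int) :
    (l.map (fun x => g x + h x)).sum = (l.map g).sum + (l.map h).sum := by
  induction l with
  | nil => simp
  | cons x xs ih => simp only [List.map_cons, List.sum_cons, ih]; ring

theorem pvSwap (tokens : List String) (kaal : List (String × Int)) :
    (tokens.map (fun d => (kaal.map (fun b => if d = b.1 then b.2 else 0)).sum)).sum
      = (kaal.map (fun b => b.2 * pvOcc tokens b.1)).sum := by
  induction tokens with
  | nil => simp [pvOcc]
  | cons d l ih =>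
      simp only [List.map_cons, List.sum_cons, ih]
      have : (kaal.map (fun b => b.2 * pvOcc (d :: l) b.1)).sum
          = (kaal.map (fun b => (if d = b.1 then b.2 else 0) + b.2 * pvOcc l b.1)).sum := by
        apply congrArg
        apply List.map_congr_left
        intro b _
        simp only [pvOcc, List.map_cons, List.sum_cons]
        by_cases h : d = b.1 <;> simp [h, eq_comm] <;> ring
      rw [this, pvMapSum_add]

theorem pvB_sum (tg : List (List String)) (kaal : List (String × Int)) :
    kaalude_summa_alt tg kaal = (kaal.map (fun b => b.2 * pvOcc tg.flatten b.1)).sum := by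
  unfold kaalude_summa_alt
  simp only [List.flatMap_id']
  apply congrArg
  apply List.map_congr_left
  intro b _
  rw [pvOcc_eq_count]

-- ===== VERDICT =====
theorem kaalude_summa_spec : Claim_equal_kaalude_summa := by
  intro tg kaal _
  unfold Spec_kaalude_summa
  rw [pvA_flatten, pvA_sum, pvSwap, pvB_sum]
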